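-- pv_equiv track=rewrite | github.com/kimgaeul02/BaekjoonCode | 프로그래머스/lv1/42840. 모의고사/모의고사.py | solution
-- ===== SOURCE A (Python) =====
-- def solution(answers):
--
--     answer = []
--     score = [0,0,0]
--     student = [[1,2,3,4,5],
--                [2,1,2,3,2,4,2,5],
--                [3,3,1,1,2,2,4,4,5,5]]
--
--     for i in range (len(answers)):
--         if answers[i] == student[0][(i%5)]:
--             score[0] += 1
--         if answers[i] == student[1][(i%8)]:
--             score[1] += 1
--         if answers[i] == student[2][(i%10)]:
--             score[2] += 1
--
--     for i in range (3):
--         if score[i] == max(score):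
--             answer.append(i+1)
--
--     return answer
-- ===== SOURCE B (Python) =====
-- def _score(pattern, answers):
--     score = 0
--     rest = pattern
--     for a in answers:
--         if not rest:
--             rest = pattern
--         if a == rest[0]:
--             score += 1
--         rest = rest[1:]
--     return score
--
--
-- def solution(answers):
--     patterns = [[1, 2, 3, 4, 5],
--                 [2, 1, 2, 3, 2, 4, 2, 5],
--                 [3, 3, 1, 1, 2, 2, 4, 4, 5, 5]]
--     scores = [_score(p, answers) for p in patterns]
--     best = max(scores)
--     return [i + 1 for i, s in enumerate(scores) if s == best]
-- ===== Notes on version B (the rewrite author's own statement) =====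
-- stated objective: idiomatic
-- what changed: Replaces A's single combined loop (absolute index with i%5/i%8/i%10 lookups and a per-iteration max() inside the output loop) by one independent cycling-suffix pass per student pattern, then a single max and an enumerate-filter comprehension for the winners.
import Mathlib
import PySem

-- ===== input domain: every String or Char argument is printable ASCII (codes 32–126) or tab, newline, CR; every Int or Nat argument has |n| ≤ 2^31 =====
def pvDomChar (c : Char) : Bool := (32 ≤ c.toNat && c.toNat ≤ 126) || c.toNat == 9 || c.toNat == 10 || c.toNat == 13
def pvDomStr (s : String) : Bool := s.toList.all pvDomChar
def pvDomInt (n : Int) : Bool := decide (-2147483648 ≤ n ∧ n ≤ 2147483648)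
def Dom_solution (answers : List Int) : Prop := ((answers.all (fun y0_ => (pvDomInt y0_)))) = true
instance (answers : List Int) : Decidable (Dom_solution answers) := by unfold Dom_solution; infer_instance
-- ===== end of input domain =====

-- B scores each student with an independent cycling-pattern pass plus an enumerate-filter of
-- the best scores, instead of A's single combined loop (absolute index, i%5/i%8/i%10) with a
-- per-iteration max() in the output loop; same return value (objective: idiomatic).


-- ===== PORT A =====
-- one iteration of A's counting loop (state = the 3-slot score list);
-- all pyGetD/pySetD indices are in range on every input, so the defaults are never used
def aStep (answers : List Int) (sc : List Int) (i : Int) : List Int :=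
  let student : List (List Int) := [[1,2,3,4,5],[2,1,2,3,2,4,2,5],[3,3,1,1,2,2,4,4,5,5]]
  let sc := if PySem.List.pyGetD answers i 0 = PySem.List.pyGetD (PySem.List.pyGetD student 0 []) (PySem.Int.mod i 5) 0
            then PySem.List.pySetD sc 0 (PySem.List.pyGetD sc 0 0 + 1) else sc
  let sc := if PySem.List.pyGetD answers i 0 = PySem.List.pyGetD (PySem.List.pyGetD student 1 []) (PySem.Int.mod i 8) 0
            then PySem.List.pySetD sc 1 (PySem.List.pyGetD sc 1 0 + 1) else sc
  if PySem.List.pyGetD answers i 0 = PySem.List.pyGetD (PySem.List.pyGetD student 2 []) (PySem.Int.mod i 10) 0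
  then PySem.List.pySetD sc 2 (PySem.List.pyGetD sc 2 0 + 1) else sc

def solution (answers : List Int) : List Int :=
  let answer : List Int := []
  let score : List Int := [0, 0, 0]
  let score := (PySem.List.pyRange 0 (answers.length : Int) 1).foldl (aStep answers) score
  (PySem.List.pyRange 0 3 1).foldl
    (fun ans i =>
      if PySem.List.pyGetD score i 0 = (PySem.List.max? score (fun x => x)).getD 0
      then ans ++ [i + 1] else ans) answer

-- ===== PORT B =====
-- _score of Source B: walk answers once, consuming a suffix of the pattern, refilling when empty
-- (rest[0] / rest[1:] ported as headD 0 / tail: rest is nonempty there for B's nonempty patterns)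
def cycScore (full : List Int) : List Int → List Int → Int → Int
  | [], _, score => score
  | a :: ans, rest, score =>
      let rest := if rest.isEmpty then full else rest
      cycScore full ans rest.tail (if a = rest.headD 0 then score + 1 else score)

def solution_alt (answers : List Int) : List Int :=
  let patterns : List (List Int) := [[1,2,3,4,5],[2,1,2,3,2,4,2,5],[3,3,1,1,2,2,4,4,5,5]]
  let scores := patterns.map (fun p => cycScore p answers p 0)
  let best := (PySem.List.max? scores (fun x => x)).getD 0
  ((PySem.List.enumerate scores 0).filter (fun is => is.2 == best)).map (fun is => is.1 + 1)

-- ===== PRECONDITION & SPEC =====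
def Spec_solution (answers : List Int) (out : List Int) : Prop := out = solution_alt answers
instance (answers : List Int) (out : List Int) : Decidable (Spec_solution answers out) := by unfold Spec_solution; infer_instance

-- ===== CLAIM (what is proved, stated in full; the proofs are below) =====
def Claim_equal_solution : Prop := ∀ (answers : List Int), Dom_solution answers → Spec_solution answers (solution answers)

-- ===== LEMMAS AND PROOFS =====

-- the three answer patterns, named for the proofs
def P0 : List Int := [1,2,3,4,5]
def P1 : List Int := [2,1,2,3,2,4,2,5]
def P2 : List Int := [3,3,1,1,2,2,4,4,5,5]

-- common characterisation both loops are reduced to: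
-- cnt pat ans k = number of positions i with ans[i] = pat[(k+i) % |pat|]
def cnt (pat : List Int) : List Int → Nat → Int
  | [], _ => 0
  | a :: ans, k => (if a = pat.getD (k % pat.length) 0 then 1 else 0) + cnt pat ans (k + 1)

lemma cnt_add_len (pat : List Int) (ans : List Int) : ∀ k, cnt pat ans (k + pat.length) = cnt pat ans k := by
  induction ans with
  | nil => intro k; rfl
  | cons a ans ih =>
      intro k
      simp only [cnt, Nat.add_mod_right]
      rw [show k + pat.length + 1 = (k + 1) + pat.length by omega, ih]

lemma cnt_append (pat : List Int) (xs : List Int) (x : Int) :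
    ∀ k, cnt pat (xs ++ [x]) k
      = cnt pat xs k + (if x = pat.getD ((k + xs.length) % pat.length) 0 then 1 else 0) := by
  induction xs with
  | nil => intro k; simp [cnt]
  | cons a xs ih =>
      intro k
      simp only [List.cons_append, cnt, ih (k + 1), List.length_cons]
      rw [show k + 1 + xs.length = k + (xs.length + 1) by omega]
      ring_nf

-- B's pass, started on the suffix full.drop k, counts matches against the cycled pattern
lemma cycScore_eq (full : List Int) (hf : full ≠ []) (ans : List Int) :
    ∀ k score, k ≤ full.length →
      cycScore full ans (full.drop k) score = score + cnt full ans k := by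
  induction ans with
  | nil => intro k score _; simp [cycScore, cnt]
  | cons a ans ih =>
      intro k score hk
      by_cases hlt : k < full.length
      · rw [List.drop_eq_getElem_cons hlt]
        simp only [cycScore, List.isEmpty_cons, Bool.false_eq_true, if_false, List.tail_cons,
          List.headD_cons]
        rw [ih (k + 1) _ (by omega)]
        simp only [cnt, Nat.mod_eq_of_lt hlt, List.getD_eq_getElem full 0 hlt]
        split_ifs <;> ring
      · obtain ⟨p, ps, rfl⟩ := List.exists_cons_of_ne_nil hf
        have hL : (p :: ps).length = ps.length + 1 := by simp
        have hk' : k = ps.length + 1 := by omega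
        subst hk'
        rw [show (ps.length + 1) = (p :: ps).length from hL.symm, List.drop_length]
        simp only [cycScore, List.isEmpty_nil, if_true, cnt]
        rw [show (p :: ps).tail = (p :: ps).drop 1 by simp]
        rw [ih 1 _ (by simp)]
        simp only [List.headD_cons, hL, Nat.mod_self, List.getD_cons_zero]
        rw [show ps.length + 1 + 1 = 1 + (p :: ps).length by simp; omega]
        rw [cnt_add_len]
        split_ifs <;> ring

lemma cycScore_full (full : List Int) (hf : full ≠ []) (ans : List Int) :
    cycScore full ans full 0 = cnt full ans 0 := by
  have := cycScore_eq full hf ans 0 0 (Nat.zero_le _)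
  simpa using this

lemma pyGetD_append_lt (xs : List Int) (x : Int) (i : Int) (h0 : 0 ≤ i) (h : i < (xs.length : Int)) :
    PySem.List.pyGetD (xs ++ [x]) i 0 = PySem.List.pyGetD xs i 0 := by
  rw [PySem.List.pyGetD_eq_getElem _ _ h0 (by simp; omega),
      PySem.List.pyGetD_eq_getElem _ _ h0 (by omega)]
  exact List.getElem_append_left (by omega)

-- one step of A's loop on a 3-slot state, in closed form
lemma aStep_char (answers : List Int) (u v w : Int) (n : Nat) :
    aStep answers [u, v, w] (n : Int) =
      [if PySem.List.pyGetD answers (n : Int) 0 = P0.getD (n % 5) 0 then u + 1 else u,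
       if PySem.List.pyGetD answers (n : Int) 0 = P1.getD (n % 8) 0 then v + 1 else v,
       if PySem.List.pyGetD answers (n : Int) 0 = P2.getD (n % 10) 0 then w + 1 else w] := by
  have h5 : PySem.Int.mod (n : Int) 5 = ((n % 5 : Nat) : Int) := by
    exact_mod_cast PySem.Int.mod_natCast n 5
  have h8 : PySem.Int.mod (n : Int) 8 = ((n % 8 : Nat) : Int) := by
    exact_mod_cast PySem.Int.mod_natCast n 8
  have h10 : PySem.Int.mod (n : Int) 10 = ((n % 10 : Nat) : Int) := by
    exact_mod_cast PySem.Int.mod_natCast n 10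
  have s0 : PySem.List.pyGetD ([[1,2,3,4,5],[2,1,2,3,2,4,2,5],[3,3,1,1,2,2,4,4,5,5]] : List (List Int)) 0 [] = [1,2,3,4,5] := rfl
  have s1 : PySem.List.pyGetD ([[1,2,3,4,5],[2,1,2,3,2,4,2,5],[3,3,1,1,2,2,4,4,5,5]] : List (List Int)) 1 [] = [2,1,2,3,2,4,2,5] := rfl
  have s2 : PySem.List.pyGetD ([[1,2,3,4,5],[2,1,2,3,2,4,2,5],[3,3,1,1,2,2,4,4,5,5]] : List (List Int)) 2 [] = [3,3,1,1,2,2,4,4,5,5] := rfl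
  simp only [aStep, h5, h8, h10, s0, s1, s2, PySem.List.pyGetD_natCast, P0, P1, P2]
  split_ifs <;> simp [PySem.List.pySetD, PySem.List.pySet?, PySem.List.pyIdx?, PySem.List.pyGetD]

-- A's whole counting loop computes the three cnt values
lemma aloop (ans : List Int) :
    ∀ a b c : Int, (PySem.List.pyRange 0 (ans.length : Int) 1).foldl (aStep ans) [a, b, c]
      = [a + cnt P0 ans 0, b + cnt P1 ans 0, c + cnt P2 ans 0] := by
  induction ans using List.reverseRecOn with
  | nil => intro a b c; simp [PySem.List.pyRange_one_eq_nil, cnt]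
  | append_singleton xs x ih =>
      intro a b c
      rw [show ((xs ++ [x]).length : Int) = (xs.length : Int) + 1 by simp,
          PySem.List.pyRange_one_succ_right (by positivity), List.foldl_append]
      have hpre : List.foldl (aStep (xs ++ [x])) [a, b, c] (PySem.List.pyRange 0 (xs.length : Int) 1)
          = List.foldl (aStep xs) [a, b, c] (PySem.List.pyRange 0 (xs.length : Int) 1) := by
        apply PySem.List.foldl_congr_mem
        intro acc i hi
        rw [PySem.List.mem_pyRange_one] at hi
        unfold aStep
        rw [pyGetD_append_lt xs x i hi.1 hi.2]
      rw [hpre, ih a b c]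
      simp only [List.foldl_cons, List.foldl_nil]
      rw [aStep_char]
      have hx : PySem.List.pyGetD (xs ++ [x]) (xs.length : Int) 0 = x := by
        rw [PySem.List.pyGetD_eq_getElem _ _ (by positivity) (by simp)]
        simp
      rw [hx]
      simp only [cnt_append, Nat.zero_add]
      have l0 : P0.length = 5 := rfl
      have l1 : P1.length = 8 := rfl
      have l2 : P2.length = 10 := rfl
      rw [l0, l1, l2]
      split_ifs <;> simp <;> try omega

-- both final passes pick the same winners from the same three scores
lemma finalEq (c0 c1 c2 : Int) :
    (PySem.List.pyRange 0 3 1).foldl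
      (fun ansl i =>
        if PySem.List.pyGetD [c0, c1, c2] i 0
            = (PySem.List.max? [c0, c1, c2] (fun x => x)).getD 0
        then ansl ++ [i + 1] else ansl) []
    = ((PySem.List.enumerate [c0, c1, c2] 0).filter
        (fun is => is.2 == (PySem.List.max? [c0, c1, c2] (fun x => x)).getD 0)).map
        (fun is => is.1 + 1) := by
  have hr : PySem.List.pyRange 0 3 1 = [0, 1, 2] := by decide
  have he : PySem.List.enumerate ([c0, c1, c2] : List Int) 0 = [(0, c0), (1, c1), (2, c2)] := rfl
  have g0 : PySem.List.pyGetD [c0, c1, c2] (0 : Int) 0 = c0 := by simp [PySem.List.pyGetD]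
  have g1 : PySem.List.pyGetD [c0, c1, c2] (1 : Int) 0 = c1 := by simp [PySem.List.pyGetD]
  have g2 : PySem.List.pyGetD [c0, c1, c2] (2 : Int) 0 = c2 := by simp [PySem.List.pyGetD]
  rw [hr, he]
  simp only [List.foldl_cons, List.foldl_nil, g0, g1, g2]
  generalize (PySem.List.max? [c0, c1, c2] (fun x => x)).getD 0 = m
  have b0 : ((c0 == m) : Bool) = decide (c0 = m) := rfl
  have b1 : ((c1 == m) : Bool) = decide (c1 = m) := rfl
  have b2 : ((c2 == m) : Bool) = decide (c2 = m) := rfl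
  by_cases h0 : c0 = m <;> by_cases h1 : c1 = m <;> by_cases h2 : c2 = m <;>
    simp [h0, h1, h2, b0, b1, b2, List.filter]

-- ===== VERDICT (by name: the statement is the Claim_ definition above) =====
theorem solution_spec : Claim_equal_solution := by
  intro answers _
  show solution answers = solution_alt answers
  unfold solution solution_alt
  simp only [List.map_cons, List.map_nil]
  rw [aloop answers 0 0 0]
  rw [show cycScore [1,2,3,4,5] answers [1,2,3,4,5] 0 = cnt P0 answers 0 from by
        simpa [P0] using cycScore_full [1,2,3,4,5] (by simp) answers]
  rw [show cycScore [2,1,2,3,2,4,2,5] answers [2,1,2,3,2,4,2,5] 0 = cnt P1 answers 0 from by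
        simpa [P1] using cycScore_full [2,1,2,3,2,4,2,5] (by simp) answers]
  rw [show cycScore [3,3,1,1,2,2,4,4,5,5] answers [3,3,1,1,2,2,4,4,5,5] 0 = cnt P2 answers 0 from by
        simpa [P2] using cycScore_full [3,3,1,1,2,2,4,4,5,5] (by simp) answers]
  simp only [zero_add]
  exact finalEq (cnt P0 answers 0) (cnt P1 answers 0) (cnt P2 answers 0)
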